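-- pv_equiv track=rewrite | github.com/builong1999/Traffic-Monitoring | detect_2_lines.py | sort_point_to_poly
-- ===== SOURCE A (Python) =====
-- def sort_point_to_poly(points,w,h):
--     list1 = []
--     list2 = []
--     for point in points:
--         if point[0] < w/2:
--             list1.append(point)
--         else:
--             list2.append(point)
--     list1 = sorted(list1,key=lambda k:k[1], reverse=True)
--     list2 = sorted(list2,key=lambda k:k[1])
--     return list1 + list2
-- ===== SOURCE B (Python) =====
-- def sort_point_to_poly(points, w, h):
--     return sorted(points, key=lambda p: (0, -p[1]) if p[0] < w / 2 else (1, p[1]))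
-- ===== Notes on version B (the rewrite author's own statement) =====
-- stated objective: simpler
-- what changed: Replaces the explicit partition into two lists and two separate sorts with a single stable sort over all points using a composite key ((0,-y) on the left half, (1,y) on the right), relying on sort stability to reproduce the two groups and their tie order.
import Mathlib
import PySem

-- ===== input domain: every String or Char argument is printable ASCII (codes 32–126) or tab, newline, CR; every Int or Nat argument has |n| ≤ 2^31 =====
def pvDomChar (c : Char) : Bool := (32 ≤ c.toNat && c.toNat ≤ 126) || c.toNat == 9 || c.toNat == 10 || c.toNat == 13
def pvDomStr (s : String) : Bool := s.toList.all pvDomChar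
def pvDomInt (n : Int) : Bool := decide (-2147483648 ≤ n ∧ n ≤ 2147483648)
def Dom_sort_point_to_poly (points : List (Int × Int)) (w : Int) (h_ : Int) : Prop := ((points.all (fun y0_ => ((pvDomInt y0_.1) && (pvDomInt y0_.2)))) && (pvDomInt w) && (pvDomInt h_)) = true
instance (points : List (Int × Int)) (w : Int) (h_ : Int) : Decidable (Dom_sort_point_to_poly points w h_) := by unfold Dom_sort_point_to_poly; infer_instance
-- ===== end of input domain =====

-- B replaces A's explicit partition into two lists followed by two separate stable sorts with a
-- single stable sort of all points under a composite key ((0, -y) on the left half, (1, y) on the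
-- right); objective: simpler (one pass, one sort call), same O(n log n) cost.

-- ===== PORT A =====
-- 'point[0] < w/2' uses Python float division; on Dom (|ints| ≤ 2^31) both sides are exact in
-- float, so the comparison is exactly the integer comparison 2*point[0] < w, which is how it is
-- ported (in both ports).
def sort_point_to_poly (points : List (Int × Int)) (w : Int) (h_ : Int) : List (Int × Int) :=
  let lists := points.foldl
    (fun (acc : List (Int × Int) × List (Int × Int)) point =>
      if 2 * point.1 < w then (acc.1 ++ [point], acc.2) else (acc.1, acc.2 ++ [point]))
    ([], [])
  PySem.List.sorted lists.1 (fun k => k.2) true ++ PySem.List.sorted lists.2 (fun k => k.2)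

-- ===== PORT B =====
def sort_point_to_poly_alt (points : List (Int × Int)) (w : Int) (h_ : Int) : List (Int × Int) :=
  PySem.List.sorted2 points
    (fun p => if 2 * p.1 < w then (0 : Int) else 1)
    (fun p => if 2 * p.1 < w then -p.2 else p.2)

-- ===== PRECONDITION & SPEC =====
def Spec_sort_point_to_poly (points : List (Int × Int)) (w : Int) (h_ : Int) (out : List (Int × Int)) : Prop := out = sort_point_to_poly_alt points w h_
instance (points : List (Int × Int)) (w : Int) (h_ : Int) (out : List (Int × Int)) : Decidable (Spec_sort_point_to_poly points w h_ out) := by unfold Spec_sort_point_to_poly; infer_instance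

-- ===== CLAIM (what is proved, stated in full; the proofs are below) =====
def Claim_equal_sort_point_to_poly : Prop := ∀ (points : List (Int × Int)) (w : Int) (h_ : Int), Dom_sort_point_to_poly points w h_ → Spec_sort_point_to_poly points w h_ (sort_point_to_poly points w h_)

-- ===== LEMMAS AND PROOFS =====

-- insertBy only looks at the 'before' predicate on the elements of the list it inserts into
theorem pv_insertBy_congr {α : Type} (b1 b2 : α → α → Bool) (x : α) (l : List α)
    (h : ∀ y ∈ l, b2 x y = b1 x y) :
    PySem.List.insertBy b2 x l = PySem.List.insertBy b1 x l := by
  induction l with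
  | nil => rfl
  | cons y ys ih =>
    simp only [PySem.List.insertBy]
    rw [h y (by simp)]
    by_cases hb : b1 x y = true
    · simp [hb]
    · simp only [Bool.not_eq_true] at hb
      simp [hb, ih (fun z hz => h z (by simp [hz]))]

-- inserting an element that goes strictly before everything in acc2 lands inside acc1
theorem pv_insertBy_append_left {α : Type} (b1 b2 : α → α → Bool) (x : α) (acc1 acc2 : List α)
    (h1 : ∀ y ∈ acc1, b2 x y = b1 x y) (h2 : ∀ y ∈ acc2, b2 x y = true) :
    PySem.List.insertBy b2 x (acc1 ++ acc2) = PySem.List.insertBy b1 x acc1 ++ acc2 := by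
  induction acc1 with
  | nil =>
    cases acc2 with
    | nil => rfl
    | cons z zs => simp [PySem.List.insertBy, h2 z (by simp)]
  | cons y ys ih =>
    simp only [List.cons_append, PySem.List.insertBy]
    rw [h1 y (by simp)]
    by_cases hb : b1 x y = true
    · simp [hb]
    · simp only [Bool.not_eq_true] at hb
      simp [hb, ih (fun z hz => h1 z (by simp [hz]))]

-- inserting an element that goes after everything in acc1 lands inside acc2
theorem pv_insertBy_append_right {α : Type} (b1 b2 : α → α → Bool) (x : α) (acc1 acc2 : List α)
    (h1 : ∀ y ∈ acc1, b2 x y = false) (h2 : ∀ y ∈ acc2, b2 x y = b1 x y) :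
    PySem.List.insertBy b2 x (acc1 ++ acc2) = acc1 ++ PySem.List.insertBy b1 x acc2 := by
  induction acc1 with
  | nil => simpa using pv_insertBy_congr b1 b2 x acc2 h2
  | cons y ys ih =>
    simp only [List.cons_append, PySem.List.insertBy, h1 y (by simp)]
    simp [ih (fun z hz => h1 z (by simp [hz]))]

-- A's partition loop is the pair of filters
theorem pv_partition (w : Int) (l : List (Int × Int)) (a1 a2 : List (Int × Int)) :
    l.foldl (fun (acc : List (Int × Int) × List (Int × Int)) point =>
      if 2 * point.1 < w then (acc.1 ++ [point], acc.2) else (acc.1, acc.2 ++ [point])) (a1, a2)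
    = (a1 ++ l.filter (fun p => decide (2 * p.1 < w)),
       a2 ++ l.filter (fun p => !decide (2 * p.1 < w))) := by
  induction l generalizing a1 a2 with
  | nil => simp
  | cons x xs ih =>
    by_cases hx : 2 * x.1 < w
    · simp [List.foldl_cons, hx, ih]
    · simp [List.foldl_cons, hx, ih]

-- the core: one stable insertion-sort pass with a 'first group, then group order' predicate
-- equals the two insertion sorts of the two filtered groups, concatenated
theorem pv_main {α : Type} (c : α → Bool) (b2 bL bR : α → α → Bool)
    (hLL : ∀ a b, c a = true → c b = true → b2 a b = bL a b)
    (hLR : ∀ a b, c a = true → c b = false → b2 a b = true)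
    (hRL : ∀ a b, c a = false → c b = true → b2 a b = false)
    (hRR : ∀ a b, c a = false → c b = false → b2 a b = bR a b)
    (points acc1 acc2 : List α)
    (h1 : ∀ y ∈ acc1, c y = true) (h2 : ∀ y ∈ acc2, c y = false) :
    points.foldl (fun acc x => PySem.List.insertBy b2 x acc) (acc1 ++ acc2)
    = (points.filter c).foldl (fun acc x => PySem.List.insertBy bL x acc) acc1
      ++ (points.filter (fun x => !c x)).foldl (fun acc x => PySem.List.insertBy bR x acc) acc2 := by
  induction points generalizing acc1 acc2 with
  | nil => simp
  | cons x xs ih =>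
    by_cases hc : c x = true
    · have hstep : PySem.List.insertBy b2 x (acc1 ++ acc2)
          = PySem.List.insertBy bL x acc1 ++ acc2 :=
        pv_insertBy_append_left bL b2 x acc1 acc2
          (fun y hy => hLL x y hc (h1 y hy)) (fun y hy => hLR x y hc (h2 y hy))
      have hmem : ∀ y ∈ PySem.List.insertBy bL x acc1, c y = true := by
        intro y hy
        rw [PySem.List.mem_insertBy] at hy
        rcases hy with h | h
        · exact h ▸ hc
        · exact h1 y h
      have hfL : List.filter c (x :: xs) = x :: List.filter c xs := by
        simp [hc]
      have hfR : List.filter (fun y => !c y) (x :: xs) = List.filter (fun y => !c y) xs := by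
        simp [hc]
      simp only [List.foldl_cons, hstep, hfL, hfR]
      exact ih (PySem.List.insertBy bL x acc1) acc2 hmem h2
    · have hc' : c x = false := by simpa using hc
      have hstep : PySem.List.insertBy b2 x (acc1 ++ acc2)
          = acc1 ++ PySem.List.insertBy bR x acc2 :=
        pv_insertBy_append_right bR b2 x acc1 acc2
          (fun y hy => hRL x y hc' (h1 y hy)) (fun y hy => hRR x y hc' (h2 y hy))
      have hmem : ∀ y ∈ PySem.List.insertBy bR x acc2, c y = false := by
        intro y hy
        rw [PySem.List.mem_insertBy] at hy
        rcases hy with h | h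
        · exact h ▸ hc'
        · exact h2 y h
      have hfL : List.filter c (x :: xs) = List.filter c xs := by
        simp [hc']
      have hfR : List.filter (fun y => !c y) (x :: xs) = x :: List.filter (fun y => !c y) xs := by
        simp [hc']
      simp only [List.foldl_cons, hstep, hfL, hfR]
      exact ih acc1 (PySem.List.insertBy bR x acc2) h1 hmem

-- ===== VERDICT (by name: the statement is the Claim_ definition above) =====
theorem sort_point_to_poly_spec : Claim_equal_sort_point_to_poly := by
  intro points w h_ _
  show sort_point_to_poly points w h_ = sort_point_to_poly_alt points w h_
  unfold sort_point_to_poly sort_point_to_poly_alt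
  rw [pv_partition w points [] []]
  simp only [List.nil_append]
  rw [PySem.List.sorted_rev_eq_foldl_insertBy, PySem.List.sorted_eq_foldl_insertBy]
  unfold PySem.List.sorted2
  simp only [Bool.false_eq_true, if_false]
  exact (pv_main (fun p => decide (2 * p.1 < w))
    (fun a b => decide ((if 2 * a.1 < w then (0:Int) else 1) < (if 2 * b.1 < w then (0:Int) else 1)) ||
      (!decide ((if 2 * b.1 < w then (0:Int) else 1) < (if 2 * a.1 < w then (0:Int) else 1)) &&
        decide ((if 2 * a.1 < w then -a.2 else a.2) < (if 2 * b.1 < w then -b.2 else b.2))))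
    (fun a b => decide (b.2 < a.2)) (fun a b => decide (a.2 < b.2))
    (by intro a b ha hb
        simp only [decide_eq_true_eq] at ha hb
        simp [if_pos ha, if_pos hb])
    (by intro a b ha hb
        simp only [decide_eq_true_eq] at ha
        simp only [decide_eq_false_iff_not] at hb
        simp [if_pos ha, if_neg hb])
    (by intro a b ha hb
        simp only [decide_eq_false_iff_not] at ha
        simp only [decide_eq_true_eq] at hb
        simp [if_neg ha, if_pos hb])
    (by intro a b ha hb
        simp only [decide_eq_false_iff_not] at ha hb
        simp [if_neg ha, if_neg hb])
    points [] [] (by simp) (by simp)).symm
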